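-- pv_equiv track=rewrite | github.com/bmsuisse/retrAI | retrai/config.py | _pick_best_models
-- ===== SOURCE A (Python) =====
-- def _pick_best_models(all_models: list[str], prefix: str, limit: int = 8) -> list[str]:
--     """Filter and rank models for a provider prefix from LiteLLM's registry."""
--     matched = [m for m in all_models if m.startswith(prefix)]
--
--     # Prefer `-latest` variants and skip overly specific dated ones
--     latest = [m for m in matched if m.endswith("-latest")]
--     non_dated = [
--         m
--         for m in matched
--         if not any(c.isdigit() and len(c) >= 8 for c in m.split("-")) or m.endswith("-latest")
--     ]
--     # Combine: latest first, then non-dated, then all — deduplicated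
--     ranked: list[str] = []
--     seen: set[str] = set()
--     for m in latest + non_dated + matched:
--         if m not in seen:
--             ranked.append(m)
--             seen.add(m)
--
--     return ranked[:limit]
-- ===== SOURCE B (Python) =====
-- def _pick_best_models(all_models: list[str], prefix: str, limit: int = 8) -> list[str]:
--     """Filter and rank models for a provider prefix from LiteLLM's registry."""
--
--     def key(m: str) -> int:
--         if m.endswith("-latest"):
--             return 0
--         if any(c.isdigit() and len(c) >= 8 for c in m.split("-")):
--             return 2
--         return 1
--
--     buckets: tuple[list, list, list] = ([], [], [])
--     for m in dict.fromkeys(m for m in all_models if m.startswith(prefix)):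
--         buckets[key(m)].append(m)
--     return (buckets[0] + buckets[1] + buckets[2])[:limit]
-- ===== Notes on version B (the rewrite author's own statement) =====
-- stated objective: simpler
-- what changed: A builds three overlapping filtered lists (latest, non-dated, all matched), concatenates them and deduplicates with a seen-set loop; B deduplicates the prefix matches once (dict.fromkeys) and makes a single pass that drops each distinct model into one of three rank buckets, computing the rank predicate once per model.
import Mathlib
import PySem

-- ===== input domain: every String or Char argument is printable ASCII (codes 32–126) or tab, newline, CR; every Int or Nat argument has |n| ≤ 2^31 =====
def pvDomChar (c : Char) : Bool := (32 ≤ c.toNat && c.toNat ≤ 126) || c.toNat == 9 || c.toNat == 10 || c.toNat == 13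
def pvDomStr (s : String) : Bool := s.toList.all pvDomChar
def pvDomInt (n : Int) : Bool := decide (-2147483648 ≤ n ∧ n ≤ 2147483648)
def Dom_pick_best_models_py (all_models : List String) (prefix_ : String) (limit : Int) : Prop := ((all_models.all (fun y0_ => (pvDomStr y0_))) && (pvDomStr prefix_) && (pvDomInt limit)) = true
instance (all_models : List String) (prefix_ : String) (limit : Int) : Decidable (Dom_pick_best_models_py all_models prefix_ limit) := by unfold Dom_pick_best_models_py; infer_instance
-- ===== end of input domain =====

-- B replaces A's three concatenated filter passes plus set-dedup loop by one dedup followed by a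
-- single bucket-partition pass (one rank computation per distinct model); objective: simpler.

-- ===== PORT A =====
-- 'any(c.isdigit() and len(c) >= 8 for c in m.split("-"))' — this exact expression occurs verbatim
-- in both Pythons (A's non_dated filter, B's key), so both ports share it.
def pvDated (m : String) : Bool :=
  ((PySem.Str.split? m "-").getD []).any
    (fun c => PySem.Str.strIsdigit c && decide (8 ≤ PySem.Str.len c))

def pick_best_models_py (all_models : List String) (prefix_ : String) (limit : Int) : List String :=
  let matched := all_models.filter (fun m => PySem.Str.startswith m prefix_)
  let latest := matched.filter (fun m => PySem.Str.endswith m "-latest")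
  let non_dated := matched.filter (fun m => !pvDated m || PySem.Str.endswith m "-latest")
  let rs := (latest ++ non_dated ++ matched).foldl
      (fun (st : List String × PySem.Set String) m =>
        if PySem.Set.contains st.2 m then st
        else (st.1 ++ [m], PySem.Set.add st.2 m))
      ([], PySem.Set.empty)
  PySem.List.slice rs.1 none (some limit)

-- ===== PORT B =====
def pvKey (m : String) : Int :=
  if PySem.Str.endswith m "-latest" then 0
  else if pvDated m then 2
  else 1

def pick_best_models_py_alt (all_models : List String) (prefix_ : String) (limit : Int) : List String :=
  let buckets := (PySem.List.dedup (all_models.filter (fun m => PySem.Str.startswith m prefix_))).foldl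
      (fun (b : List String × List String × List String) m =>
        let k := pvKey m
        if k == 0 then (b.1 ++ [m], b.2.1, b.2.2)
        else if k == 1 then (b.1, b.2.1 ++ [m], b.2.2)
        else (b.1, b.2.1, b.2.2 ++ [m]))
      ([], [], [])
  PySem.List.slice (buckets.1 ++ buckets.2.1 ++ buckets.2.2) none (some limit)

-- ===== PRECONDITION & SPEC =====
def Spec_pick_best_models_py (all_models : List String) (prefix_ : String) (limit : Int) (out : List String) : Prop := out = pick_best_models_py_alt all_models prefix_ limit
instance (all_models : List String) (prefix_ : String) (limit : Int) (out : List String) : Decidable (Spec_pick_best_models_py all_models prefix_ limit out) := by unfold Spec_pick_best_models_py; infer_instance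

-- ===== CLAIM (what is proved, stated in full; the proofs are below) =====
def Claim_equal_pick_best_models_py : Prop := ∀ (all_models : List String) (prefix_ : String) (limit : Int), Dom_pick_best_models_py all_models prefix_ limit → Spec_pick_best_models_py all_models prefix_ limit (pick_best_models_py all_models prefix_ limit)

-- ===== LEMMAS AND PROOFS =====

def pvDedupF : List String → List String → List String
  | _, [] => []
  | seen, x :: xs => if seen.contains x then pvDedupF seen xs else x :: pvDedupF (seen ++ [x]) xs

theorem pvDedupF_congr {s1 s2 : List String} : ∀ (l : List String),
    (∀ x ∈ l, s1.contains x = s2.contains x) → pvDedupF s1 l = pvDedupF s2 l := by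
  intro l
  induction l generalizing s1 s2 with
  | nil => intro _; rfl
  | cons x xs ih =>
    intro h
    have hx := h x (by simp)
    simp only [pvDedupF, hx]
    by_cases hc : s2.contains x = true
    · simp only [hc, if_true]
      exact ih (fun y hy => h y (by simp [hy]))
    · simp only [Bool.not_eq_true] at hc
      simp only [hc, Bool.false_eq_true, if_false]
      congr 1
      refine ih (fun y hy => ?_)
      have hy' := h y (List.mem_cons_of_mem _ hy)
      simp only [List.contains_eq_mem, List.mem_append, List.mem_singleton] at *
      by_cases hyx : y = x <;> simp [hyx, hy']

theorem pvDedupF_append (s l1 l2 : List String) :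
    pvDedupF s (l1 ++ l2) = pvDedupF s l1 ++ pvDedupF (s ++ pvDedupF s l1) l2 := by
  induction l1 generalizing s with
  | nil => simp [pvDedupF]
  | cons x xs ih =>
    by_cases hc : s.contains x = true <;>
      simp only [List.cons_append, pvDedupF, hc, Bool.false_eq_true, if_true, if_false]
    · exact ih s
    · rw [ih (s ++ [x])]
      simp

theorem pvDedupF_filter (s : List String) (l : List String) (p : String → Bool) :
    pvDedupF s (l.filter p) = (pvDedupF s l).filter p := by
  induction l generalizing s with
  | nil => simp [pvDedupF]
  | cons x xs ih =>
    by_cases hp : p x = true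
    · by_cases hc : s.contains x = true
      · simp only [List.filter_cons, hp, if_true, pvDedupF, hc]
        exact ih s
      · simp only [List.filter_cons, hp, if_true, pvDedupF, hc, Bool.false_eq_true, if_false]
        rw [ih (s ++ [x])]
    · simp only [Bool.not_eq_true] at hp
      by_cases hc : s.contains x = true
      · simp only [List.filter_cons, hp, Bool.false_eq_true, if_false, pvDedupF, hc, if_true]
        exact ih s
      · simp only [List.filter_cons, hp, Bool.false_eq_true, if_false, pvDedupF, hc]
        rw [← ih (s ++ [x])]
        refine pvDedupF_congr _ (fun y hy => ?_)
        have hyx : ¬ y = x := by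
          rintro rfl
          rw [List.mem_filter] at hy
          simp [hy.2] at hp
        simp [List.contains_eq_mem, hyx]

theorem pvDedupF_seen (s t : List String) (l : List String) :
    pvDedupF (s ++ t) l = (pvDedupF t l).filter (fun x => !s.contains x) := by
  induction l generalizing t with
  | nil => simp [pvDedupF]
  | cons x xs ih =>
    by_cases hct : t.contains x = true
    · have hst : (s ++ t).contains x = true := by
        simp only [List.contains_eq_mem, decide_eq_true_eq, List.mem_append] at *
        exact Or.inr hct
      simp only [pvDedupF, hct, hst, if_true]
      exact ih t
    · by_cases hcs : s.contains x = true
      · have hst : (s ++ t).contains x = true := by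
          simp only [List.contains_eq_mem, decide_eq_true_eq, List.mem_append] at *
          exact Or.inl hcs
        simp only [pvDedupF, hct, hst, Bool.false_eq_true, if_true, if_false,
          List.filter_cons, hcs, Bool.not_true]
        rw [← ih (t ++ [x])]
        refine pvDedupF_congr _ (fun y hy => ?_)
        simp only [List.contains_eq_mem, List.mem_append, List.mem_singleton]
        by_cases hyx : y = x
        · subst hyx
          simp only [List.contains_eq_mem, decide_eq_true_eq] at hcs
          simp [hcs]
        · simp [hyx]
      · have hxs : x ∉ s := by simpa [List.contains_eq_mem] using hcs
        have hxt : x ∉ t := by simpa [List.contains_eq_mem] using hct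
        have hst : (s ++ t).contains x = false := by
          simp [List.contains_eq_mem, hxs, hxt]
        have hct' : t.contains x = false := by simp [List.contains_eq_mem, hxt]
        simp only [pvDedupF, hst, hct', Bool.false_eq_true, if_false, List.filter_cons]
        have hcs' : (!s.contains x) = true := by simp [List.contains_eq_mem, hxs]
        simp only [hcs', if_true]
        congr 1
        rw [List.append_assoc]
        exact ih (t ++ [x])

theorem pvDedupF_seen' (s : List String) (l : List String) :
    pvDedupF s l = (pvDedupF [] l).filter (fun x => !s.contains x) := by
  have h := pvDedupF_seen s [] l
  simpa using h

theorem pvFoldA (l : List String) (r s : List String) :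
    l.foldl (fun (st : List String × PySem.Set String) m =>
        if PySem.Set.contains st.2 m then st
        else (st.1 ++ [m], PySem.Set.add st.2 m)) (r, s)
      = (r ++ pvDedupF s l, s ++ pvDedupF s l) := by
  induction l generalizing r s with
  | nil => simp [pvDedupF]
  | cons x xs ih =>
    rw [List.foldl_cons]
    show List.foldl _ (if PySem.Set.contains s x then (r, s)
        else (r ++ [x], PySem.Set.add s x)) xs = _
    by_cases hc : s.contains x = true
    · rw [if_pos (by exact hc), ih]
      simp only [pvDedupF, hc, if_true]
    · have ha : PySem.Set.add s x = s ++ [x] := by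
        simp only [PySem.Set.add, PySem.Set.contains]
        rw [if_neg hc]
      rw [if_neg (by exact hc), ha, ih]
      rw [Bool.not_eq_true] at hc
      simp only [pvDedupF, hc, Bool.false_eq_true, if_false]
      simp

theorem pvSetFold (l : List String) (s : List String) :
    l.foldl PySem.Set.add s = s ++ pvDedupF s l := by
  induction l generalizing s with
  | nil => simp [pvDedupF]
  | cons x xs ih =>
    rw [List.foldl_cons]
    by_cases hc : s.contains x = true
    · have ha : PySem.Set.add s x = s := by
        simp only [PySem.Set.add, PySem.Set.contains]
        rw [if_pos hc]
      rw [ha, ih]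
      simp only [pvDedupF, hc, if_true]
    · have ha : PySem.Set.add s x = s ++ [x] := by
        simp only [PySem.Set.add, PySem.Set.contains]
        rw [if_neg hc]
      rw [ha, ih]
      rw [Bool.not_eq_true] at hc
      simp only [pvDedupF, hc, Bool.false_eq_true, if_false]
      simp

theorem pvDedup_eq (l : List String) : PySem.List.dedup l = pvDedupF [] l := by
  rw [PySem.List.dedup, PySem.Set.ofList]
  simpa using pvSetFold l []

theorem pvBuckets (l : List String) (a b c : List String) :
    l.foldl (fun (bk : List String × List String × List String) m =>
        let k := pvKey m
        if k == 0 then (bk.1 ++ [m], bk.2.1, bk.2.2)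
        else if k == 1 then (bk.1, bk.2.1 ++ [m], bk.2.2)
        else (bk.1, bk.2.1, bk.2.2 ++ [m])) (a, b, c)
      = (a ++ l.filter (fun m => pvKey m == 0),
         b ++ l.filter (fun m => pvKey m == 1),
         c ++ l.filter (fun m => pvKey m == 2)) := by
  induction l generalizing a b c with
  | nil => simp
  | cons x xs ih =>
    rw [List.foldl_cons]
    have h0 : pvKey x = 0 ∨ pvKey x = 1 ∨ pvKey x = 2 := by
      simp only [pvKey]; split_ifs <;> simp
    rcases h0 with hk | hk | hk
    · simp only [hk, show ((0:Int) == 0) = true from rfl, if_true]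
      rw [ih]
      simp [hk]
    · simp only [hk, show ((1:Int) == 0) = false from rfl,
        show ((1:Int) == 1) = true from rfl, Bool.false_eq_true, if_false, if_true]
      rw [ih]
      simp [hk]
    · simp only [hk, show ((2:Int) == 0) = false from rfl,
        show ((2:Int) == 1) = false from rfl, Bool.false_eq_true, if_false]
      rw [ih]
      simp [hk]

theorem pvMain (M : List String) :
    pvDedupF [] (M.filter (fun m => PySem.Str.endswith m "-latest")
        ++ (M.filter (fun m => !pvDated m || PySem.Str.endswith m "-latest") ++ M))
      = (pvDedupF [] M).filter (fun m => pvKey m == 0)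
        ++ ((pvDedupF [] M).filter (fun m => pvKey m == 1)
        ++ (pvDedupF [] M).filter (fun m => pvKey m == 2)) := by
  rw [pvDedupF_append, List.nil_append, pvDedupF_append]
  rw [pvDedupF_filter]
  have hN : pvDedupF ((pvDedupF [] M).filter (fun m => PySem.Str.endswith m "-latest"))
      (M.filter (fun m => !pvDated m || PySem.Str.endswith m "-latest"))
      = (pvDedupF [] M).filter (fun m => pvKey m == 1) := by
    rw [pvDedupF_seen', pvDedupF_filter, List.filter_filter]
    refine List.filter_congr (fun x hx => ?_)
    simp only [pvKey]
    simp [List.contains_eq_mem, List.mem_filter, hx]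
    by_cases h0 : PySem.Chars.endswith x.toList ['-','l','a','t','e','s','t'] = true <;>
      by_cases hd : pvDated x = true <;> simp [h0, hd]
  rw [hN]
  have hM2 : pvDedupF ((pvDedupF [] M).filter (fun m => PySem.Str.endswith m "-latest")
        ++ (pvDedupF [] M).filter (fun m => pvKey m == 1)) M
      = (pvDedupF [] M).filter (fun m => pvKey m == 2) := by
    rw [pvDedupF_seen']
    refine List.filter_congr (fun x hx => ?_)
    simp only [pvKey]
    simp [List.contains_eq_mem, List.mem_filter, List.mem_append, hx]
    by_cases h0 : PySem.Chars.endswith x.toList ['-','l','a','t','e','s','t'] = true <;>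
      by_cases hd : pvDated x = true <;> simp [h0, hd]
  rw [hM2]
  congr 1
  refine List.filter_congr (fun x hx => ?_)
  simp only [pvKey]
  simp
  by_cases h0 : PySem.Chars.endswith x.toList ['-','l','a','t','e','s','t'] = true <;>
    by_cases hd : pvDated x = true <;> simp [h0, hd]

-- ===== VERDICT (by name: the statement is the Claim_ definition above) =====
theorem pick_best_models_py_spec : Claim_equal_pick_best_models_py := by
  intro all_models prefix_ limit _
  unfold Spec_pick_best_models_py
  simp only [pick_best_models_py, pick_best_models_py_alt]
  rw [pvFoldA, pvDedup_eq, pvBuckets]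
  simp only [List.nil_append, PySem.Set.empty, List.append_assoc]
  rw [pvMain]
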